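-- pv_equiv track=rewrite | github.com/Saicharan-nukala/SkillIntelligentModel | src/analytics/skill_analyzer.py | _is_technology_extension_match
-- ===== SOURCE A (Python) =====
-- def _is_technology_extension_match(query: str, skill_name: str) -> bool:
--     """Check if this is a case like 'Node' matching with 'Node.js'"""
--     common_extensions = ['.js', '.net', '.py', '.java', '.ts', '.go', '.rb', '.php', '.sh','1','2','3','5','4','5','6','7','8','9','10']
--     query_lower = query.lower()
--     skill_lower = skill_name.lower()
--
--     # Case 1: Query is base name, skill has extension
--     if any(skill_lower == f"{query_lower}{ext}" for ext in common_extensions):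
--         return True
--
--     # Case 2: Skill is base name, query has extension
--     if any(query_lower == f"{skill_lower}{ext}" for ext in common_extensions):
--         return True
--
--     # Case 3: Both have different extensions but same base
--     for ext1 in common_extensions:
--         for ext2 in common_extensions:
--             if (query_lower.endswith(ext1) and skill_lower.endswith(ext2)):
--                 base1 = query_lower[:-len(ext1)]
--                 base2 = skill_lower[:-len(ext2)]
--                 if base1 == base2:
--                     return True
--     return False
-- ===== SOURCE B (Python) =====
-- def _is_technology_extension_match(query: str, skill_name: str) -> bool:
--     """Check if this is a case like 'Node' matching with 'Node.js'"""
--     common_extensions = ['.js', '.net', '.py', '.java', '.ts', '.go', '.rb', '.php', '.sh','1','2','3','5','4','5','6','7','8','9','10']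
--
--     def bases(s):
--         return {s[:-len(ext)] for ext in common_extensions if s.endswith(ext)}
--
--     query_lower = query.lower()
--     skill_lower = skill_name.lower()
--     bq = bases(query_lower)
--     bs = bases(skill_lower)
--     # base/extension match: query is skill's base, skill is query's base,
--     # or the two share a common base under some pair of extensions
--     return query_lower in bs or skill_lower in bq or not bq.isdisjoint(bs)
-- ===== Notes on version B (the rewrite author's own statement) =====
-- stated objective: simpler
-- what changed: Replaces the two any()-scans over formatted strings and the nested double loop over extension pairs with one precomputed set of strippable bases per string, answered by two set memberships and a set-disjointness test.
import Mathlib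
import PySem

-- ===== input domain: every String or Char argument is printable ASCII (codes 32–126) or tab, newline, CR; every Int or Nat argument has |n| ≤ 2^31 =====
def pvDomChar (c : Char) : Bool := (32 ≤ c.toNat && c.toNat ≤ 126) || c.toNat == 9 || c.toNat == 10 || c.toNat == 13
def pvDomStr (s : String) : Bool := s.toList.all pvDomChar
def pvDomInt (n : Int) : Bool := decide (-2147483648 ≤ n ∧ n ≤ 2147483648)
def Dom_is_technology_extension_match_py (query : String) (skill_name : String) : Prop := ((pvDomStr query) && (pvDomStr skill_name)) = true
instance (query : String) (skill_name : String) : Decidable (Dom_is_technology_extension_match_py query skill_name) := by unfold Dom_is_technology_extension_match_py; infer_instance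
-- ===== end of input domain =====

-- B replaces A's two any()-scans and nested extension-pair double loop with per-string
-- sets of strippable bases answered by set membership and a disjointness test (simpler).

-- ===== PORT A =====
-- the common_extensions list (shared literal of both Pythons)
def pvExts : List (List Char) :=
  [['.','j','s'], ['.','n','e','t'], ['.','p','y'], ['.','j','a','v','a'], ['.','t','s'],
   ['.','g','o'], ['.','r','b'], ['.','p','h','p'], ['.','s','h'],
   ['1'], ['2'], ['3'], ['5'], ['4'], ['5'], ['6'], ['7'], ['8'], ['9'], ['1','0']]

def is_technology_extension_match_py (query : String) (skill_name : String) : Bool :=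
  let query_lower := PySem.Chars.lower query.toList
  let skill_lower := PySem.Chars.lower skill_name.toList
  -- Case 1: Query is base name, skill has extension
  if pvExts.any (fun ext => skill_lower == query_lower ++ ext) then true
  -- Case 2: Skill is base name, query has extension
  else if pvExts.any (fun ext => query_lower == skill_lower ++ ext) then true
  -- Case 3: Both have different extensions but same base (nested loop, early return on a hit)
  else pvExts.any (fun ext1 => pvExts.any (fun ext2 =>
    PySem.Chars.endswith query_lower ext1 && PySem.Chars.endswith skill_lower ext2 &&
    (PySem.Chars.slice query_lower none (some (-(ext1.length : Int))) ==
     PySem.Chars.slice skill_lower none (some (-(ext2.length : Int))))))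

-- ===== PORT B =====
-- bases(s) = {s[:-len(ext)] for ext in common_extensions if s.endswith(ext)}
def pvBases (s : List Char) : PySem.Set (List Char) :=
  PySem.Set.ofList ((pvExts.filter (fun ext => PySem.Chars.endswith s ext)).map
    (fun ext => PySem.Chars.slice s none (some (-(ext.length : Int)))))

def is_technology_extension_match_py_alt (query : String) (skill_name : String) : Bool :=
  let query_lower := PySem.Chars.lower query.toList
  let skill_lower := PySem.Chars.lower skill_name.toList
  let bq := pvBases query_lower
  let bs := pvBases skill_lower
  PySem.Set.contains bs query_lower || PySem.Set.contains bq skill_lower ||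
    !(PySem.Set.isdisjoint bq bs)

-- ===== PRECONDITION & SPEC =====
def Spec_is_technology_extension_match_py (query : String) (skill_name : String) (out : Bool) : Prop := out = is_technology_extension_match_py_alt query skill_name
instance (query : String) (skill_name : String) (out : Bool) : Decidable (Spec_is_technology_extension_match_py query skill_name out) := by unfold Spec_is_technology_extension_match_py; infer_instance

-- ===== CLAIM (what is proved, stated in full; the proofs are below) =====
def Claim_equal_is_technology_extension_match_py : Prop := ∀ (query : String) (skill_name : String), Dom_is_technology_extension_match_py query skill_name → Spec_is_technology_extension_match_py query skill_name (is_technology_extension_match_py query skill_name)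

-- ===== LEMMAS AND PROOFS =====

-- every extension in the list is nonempty
theorem pvExts_ne_nil : ∀ e ∈ pvExts, e ≠ [] := by decide

-- stripping a nonempty suffix: s[:-len(e)] as drop/take
theorem pvStrip_eq (s e : List Char) (he : e ≠ []) :
    PySem.Chars.slice s none (some (-(e.length : Int))) = s.take (s.length - e.length) := by
  have h0 : 0 < e.length := List.length_pos_iff.mpr he
  simp only [PySem.Chars.slice_eq_listSlice]
  exact PySem.List.slice_to_neg_natCast s e.length h0

-- 's equals q plus extension e'  ↔  'e is a suffix of s and stripping it leaves q'
theorem pvSplit_iff (q s e : List Char) :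
    s = q ++ e ↔ (e <:+ s ∧ s.take (s.length - e.length) = q) := by
  constructor
  · rintro rfl
    refine ⟨⟨q, rfl⟩, ?_⟩
    simp
  · rintro ⟨⟨t, rfl⟩, h⟩
    simp at h
    rw [h]

-- membership in pvBases s
theorem pvMem_bases (s b : List Char) :
    b ∈ pvBases s ↔ ∃ e ∈ pvExts, PySem.Chars.endswith s e = true ∧
      PySem.Chars.slice s none (some (-(e.length : Int))) = b := by
  unfold pvBases
  rw [PySem.Set.mem_ofList]
  simp only [List.mem_map, List.mem_filter]
  constructor
  · rintro ⟨e, ⟨he, hend⟩, rfl⟩; exact ⟨e, he, hend, rfl⟩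
  · rintro ⟨e, he, hend, rfl⟩; exact ⟨e, ⟨he, hend⟩, rfl⟩

-- membership in pvBases s, phrased as concatenation
theorem pvMem_bases_iff_append (s b : List Char) :
    b ∈ pvBases s ↔ ∃ e ∈ pvExts, s = b ++ e := by
  rw [pvMem_bases]
  constructor
  · rintro ⟨e, he, hend, hsl⟩
    refine ⟨e, he, (pvSplit_iff b s e).mpr ⟨(PySem.Chars.endswith_iff s e).mp hend, ?_⟩⟩
    rw [← pvStrip_eq s e (pvExts_ne_nil e he)]; exact hsl
  · rintro ⟨e, he, hse⟩
    obtain ⟨hsuf, htake⟩ := (pvSplit_iff b s e).mp hse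
    exact ⟨e, he, (PySem.Chars.endswith_iff s e).mpr hsuf,
      by rw [pvStrip_eq s e (pvExts_ne_nil e he)]; exact htake⟩

-- non-disjointness of two PySem sets as an existential
theorem pvIsdisjoint_eq_false_iff {α : Type} [BEq α] [LawfulBEq α] (s t : PySem.Set α) :
    s.isdisjoint t = false ↔ ∃ x, x ∈ s ∧ x ∈ t := by
  unfold PySem.Set.isdisjoint
  simp [List.any_eq_true]

-- Case 1/2 scans of A  =  set membership of B
theorem pvCase12 (q s : List Char) :
    (pvExts.any (fun ext => s == q ++ ext)) = PySem.Set.contains (pvBases s) q := by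
  rw [Bool.eq_iff_iff, List.any_eq_true]
  simp only [beq_iff_eq, PySem.Set.contains_iff]
  rw [pvMem_bases_iff_append]

-- Case 3 nested scan of A  =  non-disjointness of the two base sets
theorem pvCase3 (q s : List Char) :
    (pvExts.any (fun ext1 => pvExts.any (fun ext2 =>
      PySem.Chars.endswith q ext1 && PySem.Chars.endswith s ext2 &&
      (PySem.Chars.slice q none (some (-(ext1.length : Int))) ==
       PySem.Chars.slice s none (some (-(ext2.length : Int)))))))
    = !(PySem.Set.isdisjoint (pvBases q) (pvBases s)) := by
  rw [Bool.eq_iff_iff]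
  simp only [List.any_eq_true, Bool.and_eq_true, beq_iff_eq,
    Bool.not_eq_true', pvIsdisjoint_eq_false_iff]
  constructor
  · rintro ⟨e1, he1, e2, he2, ⟨hq, hs⟩, heq⟩
    refine ⟨PySem.Chars.slice q none (some (-(e1.length : Int))), ?_, ?_⟩
    · exact (pvMem_bases q _).mpr ⟨e1, he1, hq, rfl⟩
    · exact (pvMem_bases s _).mpr ⟨e2, he2, hs, heq.symm⟩
  · rintro ⟨b, hbq, hbs⟩
    obtain ⟨e1, he1, hq, hq2⟩ := (pvMem_bases q b).mp hbq
    obtain ⟨e2, he2, hs, hs2⟩ := (pvMem_bases s b).mp hbs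
    exact ⟨e1, he1, e2, he2, ⟨hq, hs⟩, by rw [hq2, hs2]⟩

-- ===== VERDICT (by name: the statement is the Claim_ definition above) =====
theorem is_technology_extension_match_py_spec : Claim_equal_is_technology_extension_match_py := by
  intro query skill_name _
  unfold Spec_is_technology_extension_match_py
  unfold is_technology_extension_match_py is_technology_extension_match_py_alt
  simp only [pvCase12, pvCase3]
  split_ifs with h1 h2
  · simp only [PySem.Set.contains_iff] at h1; simp [h1]
  · simp only [PySem.Set.contains_iff] at h2; simp [h2]
  · simp only [PySem.Set.contains_iff] at h1 h2; simp [h1, h2]
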